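-- pv_equiv track=rewrite | github.com/djstrong/RYS | scripts/analyze_results.py | infer_num_layers_from_keys
-- ===== SOURCE A (Python) =====
-- def infer_num_layers_from_keys(keys: set[tuple[int, ...]]) -> int:
--     if not keys:
--         raise ValueError("Cannot infer num_layers from empty key set.")
--     canonical_candidates = [len(k) for k in keys if tuple(range(len(k))) == k]
--     if canonical_candidates:
--         return max(canonical_candidates)
--     if all(len(k) == 2 for k in keys):
--         return max(int(k[1]) for k in keys)
--     max_idx = max(max(k) for k in keys if k)
--     return int(max_idx + 1)
-- ===== SOURCE B (Python) =====
-- def infer_num_layers_from_keys(keys: set[tuple[int, ...]]) -> int: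
--     if not keys:
--         raise ValueError("Cannot infer num_layers from empty key set.")
--     # Case 1 by membership probing: the canonical keys are exactly the tuples
--     # (0, 1, ..., n-1); probe the set for the largest such tuple, descending
--     # from the maximum key length, instead of filtering the keys.
--     for n in range(max(len(k) for k in keys), -1, -1):
--         if tuple(range(n)) in keys:
--             return n
--     # Case 2: the set of key lengths is exactly {2}.
--     if {len(k) for k in keys} == {2}:
--         return max(k[1] for k in keys)
--     # Case 3: no key can be empty here (an empty key is canonical), so the
--     # answer is one more than the maximum over the flattened key elements.
--     return max(x for k in keys for x in k) + 1
-- ===== Notes on version B (the rewrite author's own statement) =====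
-- stated objective: alternative
-- what changed: B never filters for canonical keys: it probes the key set for the tuples (0..n-1) in descending n from the maximum key length and returns the first hit, decides case 2 by comparing the set of key lengths with {2}, and in case 3 maxes over the flattened elements instead of per-key maxima.
import Mathlib
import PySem

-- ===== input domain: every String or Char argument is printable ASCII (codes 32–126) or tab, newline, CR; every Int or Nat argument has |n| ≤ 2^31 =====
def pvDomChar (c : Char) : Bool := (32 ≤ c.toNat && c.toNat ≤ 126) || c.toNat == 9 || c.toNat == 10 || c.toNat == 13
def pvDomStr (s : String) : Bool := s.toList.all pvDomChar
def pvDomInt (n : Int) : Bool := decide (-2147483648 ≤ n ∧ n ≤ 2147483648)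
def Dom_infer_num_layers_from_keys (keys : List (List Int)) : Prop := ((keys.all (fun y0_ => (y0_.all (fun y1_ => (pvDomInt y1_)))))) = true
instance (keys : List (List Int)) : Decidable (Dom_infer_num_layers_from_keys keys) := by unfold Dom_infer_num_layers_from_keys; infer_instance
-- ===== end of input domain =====

-- B replaces A's filter-and-max over canonical keys by descending membership probes for the
-- tuples (0..n-1), tests case 2 via the set of key lengths, and maxes over the flattened
-- elements instead of per-key maxima (alternative algorithm, same cost).

-- ===== PORT A =====
-- tuple(range(len(k))) == k
def pvCanon (k : List Int) : Bool := (List.range k.length).map Int.ofNat == k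

def infer_num_layers_from_keys (keys : List (List Int)) : Int :=
  if keys = [] then 0  -- Python raises ValueError here; excluded by Pre_
  else
    let canonical_candidates := (keys.filter pvCanon).map (fun k => (k.length : Int))
    if canonical_candidates ≠ [] then
      (PySem.List.max? canonical_candidates (fun x => x)).getD 0
    else if keys.all (fun k => k.length == 2) then
      (PySem.List.max? (keys.map (fun k => (PySem.List.pyGet? k 1).getD 0)) (fun x => x)).getD 0
    else
      let max_idx := (PySem.List.max? ((keys.filter (fun k => !(k == []))).map
        (fun k => (PySem.List.max? k (fun x => x)).getD 0)) (fun x => x)).getD 0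
      max_idx + 1

-- ===== PORT B =====
-- tuple(range(n))
def pvRangeKey (n : Nat) : List Int := (List.range n).map Int.ofNat

-- the descending for-loop 'for n in range(maxlen, -1, -1): if tuple(range(n)) in keys: return n'
def pvProbe (keys : List (List Int)) : Nat → Option Nat
  | 0 => if keys.contains (pvRangeKey 0) then some 0 else none
  | n + 1 => if keys.contains (pvRangeKey (n + 1)) then some (n + 1) else pvProbe keys n

def infer_num_layers_from_keys_alt (keys : List (List Int)) : Int :=
  if keys = [] then 0  -- Python raises ValueError here; excluded by Pre_
  else
    match pvProbe keys (keys.foldl (fun m k => max m k.length) 0) with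
    | some n => (n : Int)
    | none =>
      if PySem.Set.equal (PySem.Set.ofList (keys.map (fun k => (k.length : Int))))
          (PySem.Set.ofList [2]) then
        (PySem.List.max? (keys.map (fun k => (PySem.List.pyGet? k 1).getD 0)) (fun x => x)).getD 0
      else
        (PySem.List.max? (keys.flatMap (fun k => k)) (fun x => x)).getD 0 + 1

-- ===== PRECONDITION & SPEC =====
-- A raises ValueError exactly on the empty key set; everything else is admitted.
def Pre_infer_num_layers_from_keys (keys : List (List Int)) : Prop := keys ≠ []
instance (keys : List (List Int)) : Decidable (Pre_infer_num_layers_from_keys keys) := by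
  unfold Pre_infer_num_layers_from_keys; infer_instance
def pvWitness_infer_num_layers_from_keys : List (List Int) := [[0, 3], [0, 1]]

def Spec_infer_num_layers_from_keys (keys : List (List Int)) (out : Int) : Prop := out = infer_num_layers_from_keys_alt keys
instance (keys : List (List Int)) (out : Int) : Decidable (Spec_infer_num_layers_from_keys keys out) := by unfold Spec_infer_num_layers_from_keys; infer_instance

-- ===== CLAIM (what is proved, stated in full; the proofs are below) =====
def Claim_equal_infer_num_layers_from_keys : Prop := ∀ (keys : List (List Int)), Dom_infer_num_layers_from_keys keys → Pre_infer_num_layers_from_keys keys → Spec_infer_num_layers_from_keys keys (infer_num_layers_from_keys keys)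

-- ===== LEMMAS AND PROOFS =====

theorem pvCanon_iff (k : List Int) : pvCanon k = true ↔ k = pvRangeKey k.length := by
  simp only [pvCanon, pvRangeKey, beq_iff_eq]
  exact eq_comm

theorem pvRangeKey_length (n : Nat) : (pvRangeKey n).length = n := by
  simp [pvRangeKey]

-- canonical membership: tuple(range(v)) ∈ keys ↔ (v : Int) is a canonical candidate
theorem pv_mem_canon (keys : List (List Int)) (v : Nat) :
    pvRangeKey v ∈ keys ↔ (v : Int) ∈ (keys.filter pvCanon).map (fun k => (k.length : Int)) := by
  constructor
  · intro h
    refine List.mem_map.mpr ⟨pvRangeKey v, List.mem_filter.mpr ⟨h, ?_⟩, by simp [pvRangeKey_length]⟩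
    rw [pvCanon_iff, pvRangeKey_length]
  · intro h
    obtain ⟨k, hk, hlen⟩ := List.mem_map.mp h
    obtain ⟨hmem, hcan⟩ := List.mem_filter.mp hk
    have hlv : k.length = v := by exact_mod_cast hlen
    have := (pvCanon_iff k).mp hcan
    rw [hlv] at this
    rwa [← this]

theorem pvProbe_none (keys : List (List Int)) (n : Nat) :
    pvProbe keys n = none ↔ ∀ v ≤ n, pvRangeKey v ∉ keys := by
  induction n with
  | zero =>
    simp only [pvProbe]
    by_cases hm : keys.contains (pvRangeKey 0) = true
    · rw [if_pos hm]
      constructor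
      · intro h; cases h
      · intro h; exact absurd (List.contains_iff_mem.mp hm) (h 0 le_rfl)
    · rw [if_neg hm]
      constructor
      · intro _ v hv hvk
        interval_cases v
        exact hm (List.contains_iff_mem.mpr hvk)
      · intro _; rfl
  | succ m ih =>
    simp only [pvProbe]
    by_cases hm : keys.contains (pvRangeKey (m + 1)) = true
    · rw [if_pos hm]
      constructor
      · intro h; cases h
      · intro h; exact absurd (List.contains_iff_mem.mp hm) (h (m + 1) le_rfl)
    · rw [if_neg hm, ih]
      constructor
      · intro h v hv
        rcases Nat.lt_or_ge v (m + 1) with hlt | hge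
        · exact h v (Nat.lt_succ_iff.mp hlt)
        · have hveq : v = m + 1 := le_antisymm hv hge
          subst hveq
          intro hvk
          exact hm (List.contains_iff_mem.mpr hvk)
      · intro h v hv
        exact h v (le_trans hv (Nat.le_succ m))

theorem pvProbe_some (keys : List (List Int)) (n v : Nat) (h : pvProbe keys n = some v) :
    pvRangeKey v ∈ keys ∧ v ≤ n ∧ ∀ w, w ≤ n → pvRangeKey w ∈ keys → w ≤ v := by
  induction n with
  | zero =>
    simp only [pvProbe] at h
    by_cases hm : keys.contains (pvRangeKey 0) = true
    · rw [if_pos hm] at h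
      have hv0 : 0 = v := Option.some.inj h
      subst hv0
      exact ⟨List.contains_iff_mem.mp hm, le_rfl, fun w hw _ => hw⟩
    · rw [if_neg hm] at h; cases h
  | succ m ih =>
    simp only [pvProbe] at h
    by_cases hm : keys.contains (pvRangeKey (m + 1)) = true
    · rw [if_pos hm] at h
      have hv1 : m + 1 = v := Option.some.inj h
      subst hv1
      exact ⟨List.contains_iff_mem.mp hm, le_rfl, fun w hw _ => hw⟩
    · rw [if_neg hm] at h
      obtain ⟨h1, h2, h3⟩ := ih h
      refine ⟨h1, le_trans h2 (Nat.le_succ m), fun w hw hwk => ?_⟩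
      rcases Nat.lt_or_ge w (m + 1) with hlt | hge
      · exact h3 w (Nat.lt_succ_iff.mp hlt) hwk
      · have hweq : w = m + 1 := le_antisymm hw hge
        subst hweq
        exact absurd (List.contains_iff_mem.mpr hwk) hm

theorem pv_acc_le_foldl (keys : List (List Int)) (a : Nat) :
    a ≤ keys.foldl (fun m k => max m k.length) a := by
  induction keys generalizing a with
  | nil => simp
  | cons k l ih => exact le_trans (le_max_left a k.length) (ih _)

theorem pv_len_le_maxlen (keys : List (List Int)) (k : List Int) (hk : k ∈ keys) (a : Nat) :
    k.length ≤ keys.foldl (fun m k => max m k.length) a := by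
  induction keys generalizing a with
  | nil => cases hk
  | cons h l ih =>
    rcases List.mem_cons.mp hk with rfl | hmem
    · exact le_trans (le_max_right a k.length) (pv_acc_le_foldl l _)
    · exact ih hmem _

-- Python's {len(k) for k in keys} == {2}
theorem pv_lens_eq (keys : List (List Int)) :
    PySem.Set.equal (PySem.Set.ofList (keys.map (fun k => (k.length : Int))))
        (PySem.Set.ofList [2]) = true ↔
      keys ≠ [] ∧ keys.all (fun k => k.length == 2) = true := by
  constructor
  · intro h
    simp only [PySem.Set.equal, Bool.and_eq_true, PySem.Set.issubset, List.all_eq_true] at h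
    obtain ⟨h1, h2⟩ := h
    constructor
    · intro hnil
      subst hnil
      have := h2 2 (by decide)
      simp [PySem.Set.contains, PySem.Set.ofList] at this
    · rw [List.all_eq_true]
      intro k hk
      have hmem : ((k.length : Int)) ∈ PySem.Set.ofList (keys.map (fun k => (k.length : Int))) := by
        rw [PySem.Set.mem_ofList]
        exact List.mem_map.mpr ⟨k, hk, rfl⟩
      have := h1 _ hmem
      have h2' : ((k.length : Int)) ∈ PySem.Set.ofList [(2 : Int)] := by
        simpa [PySem.Set.contains, List.contains_iff_mem] using this
      have : ((k.length : Int)) = 2 := by simpa [PySem.Set.ofList] using h2'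
      simpa using (by exact_mod_cast this : k.length = 2)
  · rintro ⟨hne, hall⟩
    rw [List.all_eq_true] at hall
    simp only [PySem.Set.equal, Bool.and_eq_true, PySem.Set.issubset, List.all_eq_true]
    constructor
    · intro x hx
      rw [PySem.Set.mem_ofList, List.mem_map] at hx
      obtain ⟨k, hk, rfl⟩ := hx
      have : k.length = 2 := by simpa using hall k hk
      simp [this, PySem.Set.contains, PySem.Set.ofList]
    · intro x hx
      have hx2 : x = (2 : Int) := by simpa [PySem.Set.ofList] using hx
      subst hx2
      obtain ⟨k, hk⟩ := List.exists_mem_of_ne_nil keys hne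
      have hlen : k.length = 2 := by simpa using hall k hk
      simp only [PySem.Set.contains, List.contains_iff_mem, PySem.Set.mem_ofList, List.mem_map]
      exact ⟨k, hk, by rw [hlen]; rfl⟩

-- max over the flattened elements = max over per-key maxima, for nonempty keys
theorem pv_max_flat (keys : List (List Int)) (hne : keys ≠ [])
    (hall : ∀ k ∈ keys, k ≠ []) :
    PySem.List.max? (keys.flatMap (fun k => k)) (fun x => x)
      = PySem.List.max? (keys.map (fun k => (PySem.List.max? k (fun x => x)).getD 0)) (fun x => x) := by
  induction keys with
  | nil => exact absurd rfl hne
  | cons k rest ih =>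
    obtain ⟨x, t, rfl⟩ := List.exists_cons_of_ne_nil (hall k (by simp))
    cases rest with
    | nil =>
      simp [PySem.List.max?_id_cons]
    | cons r rs =>
      have hrest : (r :: rs : List (List Int)) ≠ [] := by simp
      have hallr : ∀ k ∈ (r :: rs : List (List Int)), k ≠ [] :=
        fun k hk => hall k (List.mem_cons_of_mem _ hk)
      have ihr := ih hrest hallr
      obtain ⟨y, s, hflat⟩ : ∃ y s, (r ++ rs.flatMap (fun k => k) : List Int) = y :: s := by
        obtain ⟨y, s, hr⟩ := List.exists_cons_of_ne_nil (hallr r (by simp))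
        exact ⟨y, s ++ rs.flatMap (fun k => k), by simp [hr]⟩
      simp only [List.flatMap_cons, List.map_cons] at ihr ⊢
      rw [hflat] at ihr ⊢
      rw [PySem.List.max?_id_cons, PySem.List.max?_id_cons] at ihr
      have hIH : s.foldl max y
          = (rs.map (fun k => (PySem.List.max? k (fun x => x)).getD 0)).foldl max
              ((PySem.List.max? r (fun x => x)).getD 0) := Option.some.inj ihr
      have hA : (PySem.List.max? (x :: t) (fun x => x)).getD 0 = t.foldl max x := by
        rw [PySem.List.max?_id_cons]; rfl
      rw [hA]
      simp only [List.cons_append]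
      rw [PySem.List.max?_id_cons, PySem.List.max?_id_cons]
      rw [List.foldl_append]
      simp only [List.foldl_cons]
      rw [List.foldl_assoc, List.foldl_assoc, hIH]

-- ===== VERDICT (by name: the statement is the Claim_ definition above) =====
theorem infer_num_layers_from_keys_spec : Claim_equal_infer_num_layers_from_keys := by
  intro keys _ hne
  have hne' : keys ≠ [] := hne
  unfold Spec_infer_num_layers_from_keys infer_num_layers_from_keys infer_num_layers_from_keys_alt
  rw [if_neg hne', if_neg hne']
  set C := (keys.filter pvCanon).map (fun k => (k.length : Int)) with hC
  set M := keys.foldl (fun m k => max m k.length) 0 with hM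
  by_cases hc : C = []
  · -- no canonical key anywhere
    have hnoc : ∀ v : Nat, pvRangeKey v ∉ keys := by
      intro v hv
      have := (pv_mem_canon keys v).mp hv
      rw [← hC, hc] at this
      cases this
    have hprobe : pvProbe keys M = none :=
      (pvProbe_none keys M).mpr (fun v _ => hnoc v)
    rw [if_neg (not_not_intro hc), hprobe]
    by_cases hall : keys.all (fun k => k.length == 2) = true
    · rw [if_pos hall, if_pos ((pv_lens_eq keys).mpr ⟨hne', hall⟩)]
    · rw [if_neg hall, if_neg (fun h => hall ((pv_lens_eq keys).mp h).2)]
      have hnonem : ∀ k ∈ keys, k ≠ [] := by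
        intro k hk hkeq
        subst hkeq
        exact hnoc 0 hk
      have hfe : keys.filter (fun k => !(k == [])) = keys := List.filter_eq_self.mpr (by
        intro k hk; simpa using hnonem k hk)
      rw [hfe, pv_max_flat keys hne' hnonem]
  · -- some canonical key: A returns max candidate, B's probe finds it
    rw [if_pos hc]
    obtain ⟨c, t, hct⟩ := List.exists_cons_of_ne_nil hc
    have hmax : PySem.List.max? C (fun x => x) = some (t.foldl max c) := by
      rw [hct]; exact PySem.List.max?_id_cons c t
    set m := t.foldl max c with hm
    have hmem := PySem.List.max?_mem hmax
    have hisMax := PySem.List.max?_isMax hmax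
    obtain ⟨k0, hk0f, hk0len⟩ := List.mem_map.mp (hC ▸ hmem)
    set v := k0.length with hv
    have hvm : (v : Int) = m := hk0len
    have hrk : pvRangeKey v ∈ keys := (pv_mem_canon keys v).mpr (by rw [← hC]; rw [hvm]; exact hmem)
    have hvM : v ≤ M := by
      have := pv_len_le_maxlen keys (pvRangeKey v) hrk 0
      rwa [pvRangeKey_length] at this
    have hprobe : pvProbe keys M ≠ none := by
      intro h
      exact (pvProbe_none keys M).mp h v hvM hrk
    obtain ⟨w, hw⟩ := Option.ne_none_iff_exists'.mp hprobe
    obtain ⟨hw1, hw2, hw3⟩ := pvProbe_some keys M w hw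
    have hwv : w = v := by
      have hle1 : v ≤ w := hw3 v hvM hrk
      have hwC : (w : Int) ∈ C := by rw [hC]; exact (pv_mem_canon keys w).mp hw1
      have : (w : Int) ≤ m := hisMax _ hwC
      have hle2 : w ≤ v := by
        rw [← hvm] at this
        exact_mod_cast this
      exact le_antisymm hle2 hle1
    rw [hw, hwv, hmax]
    exact hvm.symm
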